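-- pv_equiv track=rewrite | github.com/pypi-data/pypi-mirror-398 | packages/exarp/exarp-0.2.2-py3-none-any.whl/project_management_automation/tools/task_clarity_improver.py | _suggest_action_verb_name
-- ===== SOURCE A (Python) =====
-- ACTION_VERBS = [
--     'add', 'implement', 'create', 'fix', 'update', 'remove',
--     'refactor', 'migrate', 'integrate', 'test', 'document', 'extend',
--     'improve', 'optimize', 'enhance', 'replace', 'delete', 'build',
--     'setup', 'configure', 'deploy', 'verify', 'validate', 'review'
-- ]
--
-- def _suggest_action_verb_name(name: str) -> str:
--     """Suggest a name starting with an action verb."""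
--     name_lower = name.lower().strip()
--
--     # Check if it already starts with a verb
--     if any(name_lower.startswith(verb) for verb in ACTION_VERBS):
--         return name
--
--     # Try to find appropriate verb based on content
--     if any(word in name_lower for word in ['bug', 'error', 'issue', 'fix', 'broken']):
--         return f"Fix {name}"
--     elif any(word in name_lower for word in ['new', 'add', 'create']):
--         return f"Add {name}"
--     elif any(word in name_lower for word in ['update', 'change', 'modify']):
--         return f"Update {name}"
--     elif any(word in name_lower for word in ['remove', 'delete', 'cleanup']):
--         return f"Remove {name}"
--     elif any(word in name_lower for word in ['test', 'testing']):
--         return f"Test {name}"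
--     elif any(word in name_lower for word in ['doc', 'documentation', 'readme']):
--         return f"Document {name}"
--     else:
--         # Default: use "Implement" as it's generic
--         return f"Implement {name}"
-- ===== SOURCE B (Python) =====
-- ACTION_VERBS = [
--     'add', 'implement', 'create', 'fix', 'update', 'remove',
--     'refactor', 'migrate', 'integrate', 'test', 'document', 'extend',
--     'improve', 'optimize', 'enhance', 'replace', 'delete', 'build',
--     'setup', 'configure', 'deploy', 'verify', 'validate', 'review'
-- ]
--
-- # One flat keyword -> priority map; priority indexes VERBS.
-- KEYWORD_PRIORITY = {
--     'bug': 0, 'error': 0, 'issue': 0, 'fix': 0, 'broken': 0,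
--     'new': 1, 'add': 1, 'create': 1,
--     'update': 2, 'change': 2, 'modify': 2,
--     'remove': 3, 'delete': 3, 'cleanup': 3,
--     'test': 4, 'testing': 4,
--     'doc': 5, 'documentation': 5, 'readme': 5,
-- }
-- VERBS = ['Fix', 'Add', 'Update', 'Remove', 'Test', 'Document', 'Implement']
--
-- def _suggest_action_verb_name(name: str) -> str:
--     """Suggest a name starting with an action verb."""
--     name_lower = name.lower().strip()
--     if any(name_lower.startswith(verb) for verb in ACTION_VERBS):
--         return name
--     # Collect the priorities of every keyword occurring in the name,
--     # then pick the verb of the globally smallest priority (6 = none matched).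
--     hits = [p for kw, p in KEYWORD_PRIORITY.items() if kw in name_lower]
--     return f"{VERBS[min(hits, default=6)]} {name}"
-- ===== Notes on version B (the rewrite author's own statement) =====
-- stated objective: alternative
-- what changed: Replaces A's sequential six-branch if/elif early-exit chain by a collect-then-select strategy: one flat keyword-to-priority map is scanned once, ALL matching priorities are collected, and the verb is picked by a global min over the collected priorities (6 = default 'Implement'), with the verb table indexed by that minimum.
import Mathlib
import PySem

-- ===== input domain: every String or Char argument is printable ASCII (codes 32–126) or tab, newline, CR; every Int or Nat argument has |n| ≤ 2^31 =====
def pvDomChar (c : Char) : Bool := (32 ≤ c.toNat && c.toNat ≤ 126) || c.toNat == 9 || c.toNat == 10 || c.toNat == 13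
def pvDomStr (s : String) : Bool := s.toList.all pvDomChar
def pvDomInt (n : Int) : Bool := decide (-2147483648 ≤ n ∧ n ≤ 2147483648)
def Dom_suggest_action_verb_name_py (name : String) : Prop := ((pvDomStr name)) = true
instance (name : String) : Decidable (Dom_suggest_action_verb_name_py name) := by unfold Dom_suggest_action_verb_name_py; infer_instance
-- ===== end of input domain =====

-- B replaces A's if/elif early-exit chain by collect-all-matching-priorities then a global min
-- indexing a verb table (objective: alternative decomposition, same cost).

-- ===== PORT A =====
def pvActionVerbs : List String :=
  ["add", "implement", "create", "fix", "update", "remove",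
   "refactor", "migrate", "integrate", "test", "document", "extend",
   "improve", "optimize", "enhance", "replace", "delete", "build",
   "setup", "configure", "deploy", "verify", "validate", "review"]

def suggest_action_verb_name_py (name : String) : String :=
  let name_lower := PySem.Str.strip (PySem.Str.lower name)
  if pvActionVerbs.any (fun verb => PySem.Str.startswith name_lower verb) then
    name
  else if ["bug", "error", "issue", "fix", "broken"].any (fun word => PySem.Str.isIn word name_lower) then
    "Fix " ++ name
  else if ["new", "add", "create"].any (fun word => PySem.Str.isIn word name_lower) then
    "Add " ++ name
  else if ["update", "change", "modify"].any (fun word => PySem.Str.isIn word name_lower) then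
    "Update " ++ name
  else if ["remove", "delete", "cleanup"].any (fun word => PySem.Str.isIn word name_lower) then
    "Remove " ++ name
  else if ["test", "testing"].any (fun word => PySem.Str.isIn word name_lower) then
    "Test " ++ name
  else if ["doc", "documentation", "readme"].any (fun word => PySem.Str.isIn word name_lower) then
    "Document " ++ name
  else
    "Implement " ++ name

-- ===== PORT B =====
-- KEYWORD_PRIORITY of Source B (a dict with distinct keys, used only via a full scan → assoc list)
def pvKeywordPriority : List (String × Nat) :=
  [("bug", 0), ("error", 0), ("issue", 0), ("fix", 0), ("broken", 0),
   ("new", 1), ("add", 1), ("create", 1),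
   ("update", 2), ("change", 2), ("modify", 2),
   ("remove", 3), ("delete", 3), ("cleanup", 3),
   ("test", 4), ("testing", 4),
   ("doc", 5), ("documentation", 5), ("readme", 5)]

def pvVerbs : List String :=
  ["Fix", "Add", "Update", "Remove", "Test", "Document", "Implement"]

def suggest_action_verb_name_py_alt (name : String) : String :=
  let name_lower := PySem.Str.strip (PySem.Str.lower name)
  if pvActionVerbs.any (fun verb => PySem.Str.startswith name_lower verb) then
    name
  else
    -- hits = [p for kw, p in KEYWORD_PRIORITY.items() if kw in name_lower]
    let hits := (pvKeywordPriority.filter (fun kv => PySem.Str.isIn kv.1 name_lower)).map Prod.snd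
    -- VERBS[min(hits, default=6)]; the index is always in range (0..6), so getD's default is unreachable
    pvVerbs.getD (PySem.List.minD hits (fun p => p) 6) "" ++ " " ++ name

-- ===== PRECONDITION & SPEC =====
def Spec_suggest_action_verb_name_py (name : String) (out : String) : Prop := out = suggest_action_verb_name_py_alt name
instance (name : String) (out : String) : Decidable (Spec_suggest_action_verb_name_py name out) := by unfold Spec_suggest_action_verb_name_py; infer_instance

-- ===== CLAIM (what is proved, stated in full; the proofs are below) =====
def Claim_equal_suggest_action_verb_name_py : Prop := ∀ (name : String), Dom_suggest_action_verb_name_py name → Spec_suggest_action_verb_name_py name (suggest_action_verb_name_py name)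

-- ===== LEMMAS AND PROOFS =====

-- min(hits, default=6) = j when j is a member and a lower bound of hits
theorem pv_minD_eq {xs : List Nat} {j : Nat} (hj : j ∈ xs) (hlb : ∀ y ∈ xs, j ≤ y) :
    PySem.List.minD xs (fun p => p) 6 = j := by
  unfold PySem.List.minD
  cases hm : PySem.List.min? xs (fun p => p) with
  | none =>
    rw [PySem.List.min?_eq_none_iff] at hm
    subst hm; simp at hj
  | some m =>
    have h1 := PySem.List.min?_mem hm
    have h2 := PySem.List.min?_isMin hm j hj
    have h3 := hlb m h1
    simp at h2 ⊢
    omega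

-- the hits list of B, abbreviated for the lemmas below
def pvHits (nl : String) : List Nat :=
  (pvKeywordPriority.filter (fun kv => PySem.Str.isIn kv.1 nl)).map Prod.snd

theorem pv_mem_hits {nl : String} {kw : String} {p : Nat}
    (hkv : (kw, p) ∈ pvKeywordPriority) (hin : PySem.Str.isIn kw nl = true) :
    p ∈ pvHits nl := by
  exact List.mem_map.mpr ⟨(kw, p), List.mem_filter.mpr ⟨hkv, hin⟩, rfl⟩

theorem pv_hits_lb {nl : String} {j : Nat}
    (h : ∀ kv ∈ pvKeywordPriority, kv.2 < j → PySem.Str.isIn kv.1 nl = false) :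
    ∀ y ∈ pvHits nl, j ≤ y := by
  intro y hy
  rcases List.mem_map.mp hy with ⟨kv, hkv, rfl⟩
  rcases List.mem_filter.mp hkv with ⟨hmem, hin⟩
  by_contra hlt
  have hfalse := h kv hmem (by omega)
  simp at hfalse
  simp [hfalse] at hin

theorem pv_hits_nil {nl : String}
    (h : ∀ kv ∈ pvKeywordPriority, PySem.Str.isIn kv.1 nl = false) :
    pvHits nl = [] := by
  unfold pvHits
  rw [List.filter_eq_nil_iff.mpr (fun kv hkv => by simpa using h kv hkv)]
  rfl

set_option maxHeartbeats 1000000 in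
theorem pv_eq (name : String) :
    suggest_action_verb_name_py name = suggest_action_verb_name_py_alt name := by
  simp only [suggest_action_verb_name_py, suggest_action_verb_name_py_alt]
  set nl := PySem.Str.strip (PySem.Str.lower name) with hnl
  by_cases hs : pvActionVerbs.any (fun verb => PySem.Str.startswith nl verb) = true
  · rw [if_pos hs, if_pos hs]
  · rw [if_neg hs, if_neg hs]
    show _ = pvVerbs.getD (PySem.List.minD (pvHits nl) (fun p => p) 6) "" ++ " " ++ name
    by_cases h0 : ["bug", "error", "issue", "fix", "broken"].any (fun word => PySem.Str.isIn word nl) = true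
    · rw [if_pos h0]
      simp only [List.any_cons, List.any_nil, Bool.or_eq_true, Bool.or_false] at h0
      have hmem : (0 : Nat) ∈ pvHits nl := by
        rcases h0 with h | h | h | h | h <;> exact pv_mem_hits (by simp [pvKeywordPriority]) h
      rw [pv_minD_eq hmem (fun y _ => Nat.zero_le y)]
      rfl
    · rw [if_neg h0]
      simp only [Bool.not_eq_true, List.any_cons, List.any_nil, Bool.or_eq_false_iff, Bool.or_false] at h0
      obtain ⟨f1, f2, f3, f4, f5⟩ := h0
      by_cases h1 : ["new", "add", "create"].any (fun word => PySem.Str.isIn word nl) = true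
      · rw [if_pos h1]
        simp only [List.any_cons, List.any_nil, Bool.or_eq_true, Bool.or_false] at h1
        have hmem : (1 : Nat) ∈ pvHits nl := by
          rcases h1 with h | h | h <;> exact pv_mem_hits (by simp [pvKeywordPriority]) h
        have hlb : ∀ y ∈ pvHits nl, 1 ≤ y := pv_hits_lb (by
        simp only [pvKeywordPriority, List.forall_mem_cons]
        exact ⟨fun _ => f1, fun _ => f2, fun _ => f3, fun _ => f4, fun _ => f5, fun h => absurd h (by omega), fun h => absurd h (by omega), fun h => absurd h (by omega), fun h => absurd h (by omega), fun h => absurd h (by omega), fun h => absurd h (by omega), fun h => absurd h (by omega), fun h => absurd h (by omega), fun h => absurd h (by omega), fun h => absurd h (by omega), fun h => absurd h (by omega), fun h => absurd h (by omega), fun h => absurd h (by omega), fun h => absurd h (by omega), fun x hx => absurd hx (List.not_mem_nil)⟩)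
        rw [pv_minD_eq hmem hlb]
        rfl
      · rw [if_neg h1]
        simp only [Bool.not_eq_true, List.any_cons, List.any_nil, Bool.or_eq_false_iff, Bool.or_false] at h1
        obtain ⟨g1, g2, g3⟩ := h1
        by_cases h2 : ["update", "change", "modify"].any (fun word => PySem.Str.isIn word nl) = true
        · rw [if_pos h2]
          simp only [List.any_cons, List.any_nil, Bool.or_eq_true, Bool.or_false] at h2
          have hmem : (2 : Nat) ∈ pvHits nl := by
            rcases h2 with h | h | h <;> exact pv_mem_hits (by simp [pvKeywordPriority]) h
          have hlb : ∀ y ∈ pvHits nl, 2 ≤ y := pv_hits_lb (by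
          simp only [pvKeywordPriority, List.forall_mem_cons]
          exact ⟨fun _ => f1, fun _ => f2, fun _ => f3, fun _ => f4, fun _ => f5, fun _ => g1, fun _ => g2, fun _ => g3, fun h => absurd h (by omega), fun h => absurd h (by omega), fun h => absurd h (by omega), fun h => absurd h (by omega), fun h => absurd h (by omega), fun h => absurd h (by omega), fun h => absurd h (by omega), fun h => absurd h (by omega), fun h => absurd h (by omega), fun h => absurd h (by omega), fun h => absurd h (by omega), fun x hx => absurd hx (List.not_mem_nil)⟩)
          rw [pv_minD_eq hmem hlb]
          rfl
        · rw [if_neg h2]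
          simp only [Bool.not_eq_true, List.any_cons, List.any_nil, Bool.or_eq_false_iff, Bool.or_false] at h2
          obtain ⟨u1, u2, u3⟩ := h2
          by_cases h3 : ["remove", "delete", "cleanup"].any (fun word => PySem.Str.isIn word nl) = true
          · rw [if_pos h3]
            simp only [List.any_cons, List.any_nil, Bool.or_eq_true, Bool.or_false] at h3
            have hmem : (3 : Nat) ∈ pvHits nl := by
              rcases h3 with h | h | h <;> exact pv_mem_hits (by simp [pvKeywordPriority]) h
            have hlb : ∀ y ∈ pvHits nl, 3 ≤ y := pv_hits_lb (by
            simp only [pvKeywordPriority, List.forall_mem_cons]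
            exact ⟨fun _ => f1, fun _ => f2, fun _ => f3, fun _ => f4, fun _ => f5, fun _ => g1, fun _ => g2, fun _ => g3, fun _ => u1, fun _ => u2, fun _ => u3, fun h => absurd h (by omega), fun h => absurd h (by omega), fun h => absurd h (by omega), fun h => absurd h (by omega), fun h => absurd h (by omega), fun h => absurd h (by omega), fun h => absurd h (by omega), fun h => absurd h (by omega), fun x hx => absurd hx (List.not_mem_nil)⟩)
            rw [pv_minD_eq hmem hlb]
            rfl
          · rw [if_neg h3]
            simp only [Bool.not_eq_true, List.any_cons, List.any_nil, Bool.or_eq_false_iff, Bool.or_false] at h3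
            obtain ⟨r1, r2, r3⟩ := h3
            by_cases h4 : ["test", "testing"].any (fun word => PySem.Str.isIn word nl) = true
            · rw [if_pos h4]
              simp only [List.any_cons, List.any_nil, Bool.or_eq_true, Bool.or_false] at h4
              have hmem : (4 : Nat) ∈ pvHits nl := by
                rcases h4 with h | h <;> exact pv_mem_hits (by simp [pvKeywordPriority]) h
              have hlb : ∀ y ∈ pvHits nl, 4 ≤ y := pv_hits_lb (by
              simp only [pvKeywordPriority, List.forall_mem_cons]
              exact ⟨fun _ => f1, fun _ => f2, fun _ => f3, fun _ => f4, fun _ => f5, fun _ => g1, fun _ => g2, fun _ => g3, fun _ => u1, fun _ => u2, fun _ => u3, fun _ => r1, fun _ => r2, fun _ => r3, fun h => absurd h (by omega), fun h => absurd h (by omega), fun h => absurd h (by omega), fun h => absurd h (by omega), fun h => absurd h (by omega), fun x hx => absurd hx (List.not_mem_nil)⟩)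
              rw [pv_minD_eq hmem hlb]
              rfl
            · rw [if_neg h4]
              simp only [Bool.not_eq_true, List.any_cons, List.any_nil, Bool.or_eq_false_iff, Bool.or_false] at h4
              obtain ⟨t1, t2⟩ := h4
              by_cases h5 : ["doc", "documentation", "readme"].any (fun word => PySem.Str.isIn word nl) = true
              · rw [if_pos h5]
                simp only [List.any_cons, List.any_nil, Bool.or_eq_true, Bool.or_false] at h5
                have hmem : (5 : Nat) ∈ pvHits nl := by
                  rcases h5 with h | h | h <;> exact pv_mem_hits (by simp [pvKeywordPriority]) h
                have hlb : ∀ y ∈ pvHits nl, 5 ≤ y := pv_hits_lb (by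
                simp only [pvKeywordPriority, List.forall_mem_cons]
                exact ⟨fun _ => f1, fun _ => f2, fun _ => f3, fun _ => f4, fun _ => f5, fun _ => g1, fun _ => g2, fun _ => g3, fun _ => u1, fun _ => u2, fun _ => u3, fun _ => r1, fun _ => r2, fun _ => r3, fun _ => t1, fun _ => t2, fun h => absurd h (by omega), fun h => absurd h (by omega), fun h => absurd h (by omega), fun x hx => absurd hx (List.not_mem_nil)⟩)
                rw [pv_minD_eq hmem hlb]
                rfl
              · rw [if_neg h5]
                simp only [Bool.not_eq_true, List.any_cons, List.any_nil, Bool.or_eq_false_iff, Bool.or_false] at h5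
                obtain ⟨d1, d2, d3⟩ := h5
                have hnil : pvHits nl = [] := pv_hits_nil (by
                  simp only [pvKeywordPriority, List.forall_mem_cons]
                  exact ⟨f1, f2, f3, f4, f5, g1, g2, g3, u1, u2, u3, r1, r2, r3, t1, t2, d1, d2, d3, fun x hx => absurd hx (List.not_mem_nil)⟩)
                rw [hnil]
                rfl

-- ===== VERDICT (by name: the statement is the Claim_ definition above) =====
theorem suggest_action_verb_name_py_spec : Claim_equal_suggest_action_verb_name_py := by
  intro name _
  unfold Spec_suggest_action_verb_name_py
  exact pv_eq name
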